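/- GENERATED by tools/from_farm_form.py from prooffarm-gif/accepted/DGifGetLine.P/Proof.lean (a worked proof of the farm's unit `DGifGetLine.P`,
   accepted by the verdict) — do not edit. -/
import Gif.Spec.Units.DGifGetLine_P
import Gif.Spec.AllSegs

open X86 X86.User Asan ProgX.Base ProgX.Base.Spec Gif.Spec

set_option maxRecDepth 4000
set_option maxHeartbeats 4000000

/-!
  `DGifGetLine.P` (0x10a1e0 … 0x10a230, 17 instructions; dgif_lib.c:484): THE PROLOGUE OF A PROTECTED FUNCTION, after the recipe of
  Gif/Spec/FrameCarry.lean and the worked unit farm.gif/worked/DGifGetWord.P. The blocks below: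
    1. the prelude and the walk to the cut behind the last inline shadow store;
    2. `name_stores2`: the memory before the shadow stores gets the name `M0`, `hmem : s.mem = storesMem M0 (base / 8) F.prologue`;
    3. about `M0` (a nest of STACK stores over `e.mem`): the footprint `hsame0`, the six saved registers' slots;
    4. `after_prologue` (`HeapInv` with the own frame pushed, `GifOK`, `rem`), `prologue_same` (the footprint), `LZOK` through it;
    5. the exit assertion `AfterP`, field by field.
-/

/-- The prologue of `DGifGetLine` establishes `AfterP` at 0x10a230. -/
theorem Gif.Spec.Proved.DGifGetLine_P_ok : Gif.Spec.DGifGetLine_P.Statement := by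
  intro Lay hLay μ hμ u₀ hcode H rest frames F R n e ret he hpre
  -- 1. THE PRELUDE: the entry's facts (`he_align`, `he_room`, `he_top`, `he_retAddr`, `he_df`, `he_mx` …), the precondition
  have he0 := he
  have hpre0 := hpre
  v_entry he
  obtain ⟨henv, hlz, hrdi, hrdx, hn1, hn2, hbuf, hdisj⟩ := hpre
  -- THE WALK, 0x10a1e0 … 0x10a230 (dgif_lib.c:484 … 486): to the cut behind the last inline shadow store
  u_walk hcode [hμ.vendor] until [Gif.L.DGifGetLine.at_10a230] span [ProgX.Base.L.textLo, ProgX.Base.L.textHi] side (v_side)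
  -- 2. NAMING THE MEMORY before the two shadow stores (0x10a218, 0x10a224): the index register's source, then per store the
  -- displacement (decimal), its granule offset, its width, its value (decimal)
  have e120 : (e.reg .rsp - 120).toNat = (e.reg .rsp).toNat - 120 := by
    u_omega
  obtain ⟨M0, hM0, hmem⟩ := name_stores2 (e.reg .rsp - 120) 12582912 12582916 0 4 4059165169 4 4 4092850944
    w_mem (by omega) (by decide) (by decide) (by decide) (by decide)
  have hpro : Gif.Frames.DGifGetLine.prologue = [⟨0, 4, 4059165169⟩, ⟨4, 4, 4092850944⟩] := rfl
  rw [← hpro, e120] at hmem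
  -- 3. ABOUT `M0`: only stack stores over `e.mem` (six pushes, the frame's three header words)
  have hsame0 : Mem.SameExcept [⟨(e.reg .rsp).toNat - 688, (e.reg .rsp).toNat⟩] e.mem M0 := by
    rw [hM0]
    u_same
  have k_r15 : M0.readLE (e.reg .rsp - 8) 8 = (e.reg .r15).toNat := by
    rw [hM0]
    u_read
  have k_r14 : M0.readLE (e.reg .rsp - 16) 8 = (e.reg .r14).toNat := by
    rw [hM0]
    u_read
  have k_r13 : M0.readLE (e.reg .rsp - 24) 8 = (e.reg .r13).toNat := by
    rw [hM0]
    u_read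
  have k_r12 : M0.readLE (e.reg .rsp - 32) 8 = (e.reg .r12).toNat := by
    rw [hM0]
    u_read
  have k_rbp : M0.readLE (e.reg .rsp - 40) 8 = (e.reg .rbp).toNat := by
    rw [hM0]
    u_read
  have k_rbx : M0.readLE (e.reg .rsp - 48) 8 = (e.reg .rbx).toNat := by
    rw [hM0]
    u_read
  clear hM0 w_mem
  -- 4. THE ENVIRONMENT behind the prologue: the heap's invariant with the own frame pushed, the state invariant, the reader
  obtain ⟨hinv1, hok1, hrem1⟩ := after_prologue (top := (e.reg .rsp).toNat) (top' := (e.reg .rsp).toNat - 120) (ro := 120)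
    (Fl := Gif.Frames.DGifGetLine) henv.heap.inv henv.ctx henv.ok Gif.Frames.DGifGetLine_ok rfl he_align hsame0
    (by omega) (Nat.le_refl _) (by omega) (by omega)
  -- the prologue's footprint in front of the contract's windows (`Body.same`)
  have hsame2 := prologue_same (top := (e.reg .rsp).toNat) (Fl := Gif.Frames.DGifGetLine) Gif.Frames.DGifGetLine_ok
    (ro := 120) (ro' := 56) rfl rfl he_align (by omega) (by omega) hsame0
    [⟨(e.reg .rsi).toNat, (e.reg .rsi).toNat + n⟩,
     ⟨F.pv + 20, F.pv + 64⟩,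
     ⟨F.pv + 88, F.pv + 344⟩,
     ⟨F.pv + 344, F.pv + 4439⟩,
     ⟨F.pv + 4439, F.pv + 8535⟩,
     ⟨F.pv + 8536, F.pv + 24920⟩,
     ⟨F.gif + 96, F.gif + 100⟩,
     ⟨R.cur, R.cur + 8⟩]
  -- the prologue's own footprint: the return address and the LZW fields are read through it
  have hsame1 := prologue_same (top := (e.reg .rsp).toNat) (Fl := Gif.Frames.DGifGetLine) Gif.Frames.DGifGetLine_ok
    (ro := 120) (ro' := 56) rfl rfl he_align (by omega) (by omega) hsame0 []
  have hin : ∀ s, s ∈ Gif.Frames.DGifGetLine.prologue → s.idx + s.width ≤ 8 := by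
    decide
  rw [← hmem] at hinv1 hok1 hrem1 hsame1 hsame2
  -- `LZOK` is read through the prologue's own footprint: pv lies in the heap, above the stack and below the shadow
  have hpin := henv.ok.owns.inside henv.heap.inv.heap (o := (F.pv, 24936)) (List.mem_cons_of_mem _ List.mem_cons_self)
  have hbase := henv.heap.base
  simp only at hpin
  rw [hbase] at hpin
  have hpv_lo : 0x800040 ≤ F.pv := hpin.1
  have hpv_hi : F.pv + 24936 + 32 ≤ 0xC00000 := hpin.2.2.2.2
  clear hpin
  have hlz1 : LZOK s_10a224.mem F.pv := by
    refine hlz.sameExcept hsame1 (by omega) ?_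
    intro w hw
    simp only [List.mem_cons, List.mem_nil_iff, or_false] at hw
    rcases hw with hw | hw
    · rw [hw]
      left
      simp only
      omega
    · rw [hw]
      right
      unfold shadowSpan
      simp only
      omega
  -- 5. THE EXIT ASSERTION: `Body` at 0x10a230 (dgif_lib.c:486) …
  have hbody : DGifGetLine.Body Gif.L.DGifGetLine.at_10a230 H rest frames F R n u₀ e ret s_10a224 := {
    entry := he0
    pre := hpre0
    rip := w_rip
    rsp := w_rsp
    rbp := w_rbp
    r15 := w_r15
    r12 := w_r12
    -- a slot is read THROUGH the shadow stores (`readLE_storesMem`), then in `M0`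
    slot_r15 := by
      rw [hmem, readLE_storesMem M0 _ 8 _ hin (by omega) _ _ (by u_omega)]
      exact k_r15
    slot_r14 := by
      rw [hmem, readLE_storesMem M0 _ 8 _ hin (by omega) _ _ (by u_omega)]
      exact k_r14
    slot_r13 := by
      rw [hmem, readLE_storesMem M0 _ 8 _ hin (by omega) _ _ (by u_omega)]
      exact k_r13
    slot_r12 := by
      rw [hmem, readLE_storesMem M0 _ 8 _ hin (by omega) _ _ (by u_omega)]
      exact k_r12
    slot_rbp := by
      rw [hmem, readLE_storesMem M0 _ 8 _ hin (by omega) _ _ (by u_omega)]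
      exact k_rbp
    slot_rbx := by
      rw [hmem, readLE_storesMem M0 _ 8 _ hin (by omega) _ _ (by u_omega)]
      exact k_rbx
    -- the return address: the prologue's footprint ends below its slot
    slot_ra := by
      rw [prologue_same_readLE hsame1 (e.reg .rsp) 8 (Nat.le_refl _) (by omega)]
      exact he_retAddr
    inv := hinv1
    ok := hok1
    lz := hlz1
    rem := Nat.le_of_eq hrem1
    same := hsame2
    code := ProgX.Base.conv_code_in w_eq
    -- DF and MXCSR by hand (`v_inv` is slow behind a walk with shadow stores)
    abi := by
      refine ProgX.Base.abiInv_of ?_ ?_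
      · rw [w_flags]
        simp only [X86.User.df_setStatus]
        exact he_df
      · rw [w_mxcsr]
        exact he_mx
  }
  -- … and what only the first body segment may use: `rdi` still holds gif, `r13 = LineLen` (`mov r13d, edx` zero-extends)
  refine ReachVia.done ?_
  exact {
    body := hbody
    rdi := w_kept.get .rdi rfl
    r13 := by
      rw [w_r13, toNat_ofBV32, toNat_part32]
      exact hrdx
  }
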